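-- pv_equiv track=rewrite | github.com/tylermcm/ImageTriager | image_triage/scanner.py | edit_stem_matches
-- ===== SOURCE A (Python) =====
-- def edit_stem_matches(primary_stem: str, candidate_stem: str) -> bool:
--     if candidate_stem == primary_stem:
--         return True
--     for separator in ("_", "-", " "):
--         prefix = f"{primary_stem}{separator}"
--         if candidate_stem.startswith(prefix):
--             suffix = candidate_stem[len(prefix):]
--             if suffix and all(part.isdigit() for part in suffix.split(separator) if part):
--                 return True
--     return False
-- ===== SOURCE B (Python) =====
-- def edit_stem_matches(primary_stem: str, candidate_stem: str) -> bool: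
--     if candidate_stem == primary_stem:
--         return True
--     if not candidate_stem.startswith(primary_stem):
--         return False
--     rest = candidate_stem[len(primary_stem):]
--     sep, body = rest[0], rest[1:]
--     return sep in "_- " and bool(body) and all(c == sep or c.isdigit() for c in body)
-- ===== Notes on version B (the rewrite author's own statement) =====
-- stated objective: simpler
-- what changed: B drops A's loop over the three separators (each doing its own prefix test, slice, split and per-part isdigit check): it checks the prefix once, reads the separator directly from the first character after the prefix, and validates the remainder with a single per-character scan (digit or that separator) instead of split()+isdigit per part.
import Mathlib
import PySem

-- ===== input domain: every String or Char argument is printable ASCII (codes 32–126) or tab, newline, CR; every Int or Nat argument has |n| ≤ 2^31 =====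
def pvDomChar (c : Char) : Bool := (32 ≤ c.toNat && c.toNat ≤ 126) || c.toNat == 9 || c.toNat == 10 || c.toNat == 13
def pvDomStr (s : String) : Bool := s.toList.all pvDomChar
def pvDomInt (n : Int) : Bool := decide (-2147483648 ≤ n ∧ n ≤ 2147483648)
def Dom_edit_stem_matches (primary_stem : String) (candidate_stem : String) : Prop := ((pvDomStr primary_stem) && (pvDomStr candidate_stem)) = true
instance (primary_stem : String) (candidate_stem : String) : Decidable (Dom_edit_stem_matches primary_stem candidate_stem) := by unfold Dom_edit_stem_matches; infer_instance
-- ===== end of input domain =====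

-- B replaces A's three-separator loop (prefix test + split + per-part isdigit for each separator)
-- by a direct decomposition: read the separator from the first char after the prefix, then one
-- per-character scan of the remainder.  Objective: simpler.

-- ===== PORT A =====
-- the 'for separator in ("_", "-", " "):' loop with its early return
def editLoopA (p c : List Char) : List (List Char) → Bool
  | [] => false
  | sep :: more =>
    let pre := p ++ sep
    if PySem.Chars.startswith c pre then
      let suffix := PySem.Chars.slice c (some ((pre.length : Nat) : Int)) none
      if !suffix.isEmpty &&
          ((PySem.Chars.splitOn suffix sep).filter (fun part => !part.isEmpty)).all
            PySem.Chars.strIsdigit then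
        true
      else editLoopA p c more
    else editLoopA p c more

def edit_stem_matches (primary_stem : String) (candidate_stem : String) : Bool :=
  let p := primary_stem.toList
  let c := candidate_stem.toList
  if c == p then true
  else editLoopA p c [['_'], ['-'], [' ']]

-- ===== PORT B =====
def edit_stem_matches_alt (primary_stem : String) (candidate_stem : String) : Bool :=
  let p := primary_stem.toList
  let c := candidate_stem.toList
  if c == p then true
  else if !PySem.Chars.startswith c p then false
  else
    -- rest = candidate_stem[len(primary_stem):]; nonempty here since candidate ≠ primary
    match PySem.Chars.slice c (some ((p.length : Nat) : Int)) none with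
    | [] => false
    | sep :: body =>
      (sep == '_' || sep == '-' || sep == ' ') && !body.isEmpty &&
        body.all (fun ch => ch == sep || PySem.Chars.isdigit ch)

-- ===== PRECONDITION & SPEC =====
def Spec_edit_stem_matches (primary_stem : String) (candidate_stem : String) (out : Bool) : Prop := out = edit_stem_matches_alt primary_stem candidate_stem
instance (primary_stem : String) (candidate_stem : String) (out : Bool) : Decidable (Spec_edit_stem_matches primary_stem candidate_stem out) := by unfold Spec_edit_stem_matches; infer_instance

-- ===== CLAIM (what is proved, stated in full; the proofs are below) =====
def Claim_equal_edit_stem_matches : Prop := ∀ (primary_stem : String) (candidate_stem : String), Dom_edit_stem_matches primary_stem candidate_stem → Spec_edit_stem_matches primary_stem candidate_stem (edit_stem_matches primary_stem candidate_stem)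

-- ===== LEMMAS AND PROOFS =====

-- simple single-character splitter used only to characterise PySem.Chars.splitOn with a 1-char sep
def splitChar (s : Char) (pre : List Char) : List Char → List (List Char)
  | [] => [pre]
  | c :: rest => if c = s then pre :: splitChar s [] rest else splitChar s (pre ++ [c]) rest

theorem splitOn_go_single (s : Char) :
    ∀ (l : List Char) (fuel : Nat) (cur : List Char) (acc : List (List Char)),
      l.length < fuel →
      PySem.Chars.splitOn.go [s] fuel l cur acc = acc.reverse ++ splitChar s cur.reverse l := by
  intro l
  induction l with
  | nil =>
    intro fuel cur acc h
    cases fuel with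
    | zero => omega
    | succ f => simp [PySem.Chars.splitOn.go, splitChar]
  | cons a rest ih =>
    intro fuel cur acc h
    cases fuel with
    | zero => simp at h
    | succ f =>
      by_cases hs : s = a
      · subst hs
        simp only [PySem.Chars.splitOn.go, List.isPrefixOf, beq_self_eq_true, Bool.true_and,
          if_true, List.length_cons, List.drop_succ_cons, List.length_nil, List.drop_zero]
        rw [ih f [] (cur.reverse :: acc) (by simpa using h)]
        simp [splitChar]
      · have hb : ([s].isPrefixOf (a :: rest)) = false := by
          simp [List.isPrefixOf, hs]
        simp only [PySem.Chars.splitOn.go, hb, if_neg, Bool.false_eq_true, not_false_iff]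
        rw [ih f (a :: cur) acc (by simpa using h)]
        simp [splitChar, Ne.symm hs]

theorem splitOn_single (s : Char) (l : List Char) :
    PySem.Chars.splitOn l [s] = splitChar s [] l := by
  have := splitOn_go_single s l (l.length + 1) [] [] (by omega)
  simpa [PySem.Chars.splitOn] using this

theorem all_or_of_no_sep (s : Char) (pre : List Char)
    (h : pre.all (fun ch => !(ch == s)) = true) :
    pre.all (fun ch => ch == s || PySem.Chars.isdigit ch) = pre.all PySem.Chars.isdigit := by
  induction pre with
  | nil => rfl
  | cons a t ih =>
    simp only [List.all_cons] at h ⊢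
    obtain ⟨h1, h2⟩ := by simpa using h
    have ha : (a == s) = false := by simp [h1]
    simp [ha, ih (by simpa using h2)]

theorem splitChar_filter_all (s : Char) (hs : PySem.Chars.isdigit s = false) :
    ∀ (l pre : List Char), pre.all (fun ch => !(ch == s)) = true →
      ((splitChar s pre l).filter (fun part => !part.isEmpty)).all PySem.Chars.strIsdigit
        = (pre ++ l).all (fun ch => ch == s || PySem.Chars.isdigit ch) := by
  intro l
  induction l with
  | nil =>
    intro pre hpre
    cases pre with
    | nil => simp [splitChar]
    | cons a t =>
      simp only [splitChar, List.filter, List.isEmpty_cons, List.append_nil]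
      rw [all_or_of_no_sep s _ hpre]
      simp [PySem.Chars.strIsdigit]
  | cons c rest ih =>
    intro pre hpre
    by_cases hc : c = s
    · subst hc
      simp only [splitChar, if_true]
      have hmid : (pre ++ c :: rest).all (fun ch => ch == c || PySem.Chars.isdigit ch)
          = (pre.all (fun ch => ch == c || PySem.Chars.isdigit ch)
              && rest.all (fun ch => ch == c || PySem.Chars.isdigit ch)) := by
        simp
      rw [hmid, all_or_of_no_sep c pre hpre]
      cases pre with
      | nil =>
        simp only [List.filter_cons, List.isEmpty_nil, Bool.not_true, if_neg,
          Bool.false_eq_true, not_false_iff]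
        rw [ih [] (by simp)]
        simp
      | cons a t =>
        simp only [List.filter_cons, List.isEmpty_cons, Bool.not_false, if_pos, List.all_cons]
        rw [ih [] (by simp)]
        simp [PySem.Chars.strIsdigit, Bool.and_assoc]
    · have hpre' : (pre ++ [c]).all (fun ch => !(ch == s)) = true := by
        simp_all
      simp only [splitChar, if_neg hc]
      rw [ih (pre ++ [c]) hpre']
      simp

theorem splitOn_filter_all (s : Char) (hs : PySem.Chars.isdigit s = false) (l : List Char) :
    ((PySem.Chars.splitOn l [s]).filter (fun part => !part.isEmpty)).all PySem.Chars.strIsdigit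
      = l.all (fun ch => ch == s || PySem.Chars.isdigit ch) := by
  rw [splitOn_single]
  simpa using splitChar_filter_all s hs l [] (by simp)

theorem startswith_append_single (c p : List Char) (s : Char) :
    PySem.Chars.startswith c (p ++ [s])
      = (PySem.Chars.startswith c p && ((c.drop p.length).head? == some s)) := by
  induction p generalizing c with
  | nil =>
    cases c with
    | nil => simp [PySem.Chars.startswith, List.isPrefixOf]
    | cons b c' => simp [PySem.Chars.startswith, List.isPrefixOf, eq_comm]
  | cons a p' ih =>
    cases c with
    | nil => simp [PySem.Chars.startswith, List.isPrefixOf]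
    | cons b c' =>
      simp only [PySem.Chars.startswith, List.cons_append, List.isPrefixOf, List.length_cons,
        List.drop_succ_cons]
      rw [show (p' ++ [s]).isPrefixOf c' = PySem.Chars.startswith c' (p' ++ [s]) from rfl,
        ih c']
      simp [PySem.Chars.startswith, Bool.and_assoc]

theorem body_scan_form (x : Char) (body : List Char) :
    (!decide (body = []) && decide (∀ ch ∈ body, ch = x ∨ PySem.Chars.isdigit ch = true))
      = (!body.isEmpty && body.all fun ch => ch == x || PySem.Chars.isdigit ch) := by
  rcases Bool.eq_false_or_eq_true
      (!body.isEmpty && body.all fun ch => ch == x || PySem.Chars.isdigit ch) with h | h <;>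
    rw [h] <;> simp_all [List.all_eq_true]

theorem chars_slice_from (C : List Char) (n : Nat) :
    PySem.Chars.slice C (some ((n : Nat) : Int)) none = C.drop n := by
  simp [PySem.Chars.slice_eq_listSlice, PySem.List.slice_from_natCast]

-- ===== VERDICT (by name: the statement is the Claim_ definition above) =====
theorem edit_stem_matches_spec : Claim_equal_edit_stem_matches := by
  intro p c _
  unfold Spec_edit_stem_matches edit_stem_matches edit_stem_matches_alt
  set P := p.toList with hP
  set C := c.toList with hC
  by_cases hpc : C == P
  · simp [hpc]
  · simp only [hpc, if_neg, Bool.false_eq_true, not_false_iff, Bool.not_eq_true']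
    simp only [editLoopA, startswith_append_single, chars_slice_from, List.length_append,
      List.length_cons, List.length_nil, Nat.zero_add]
    rw [← List.tail_drop]
    cases hr : C.drop P.length with
    | nil =>
      cases hsw : PySem.Chars.startswith C P <;> simp
    | cons r body =>
      by_cases hsw : PySem.Chars.startswith C P = true
      · simp only [hsw, Bool.true_and, List.head?_cons, List.tail_cons, Option.some.injEq,
          Bool.not_true, Bool.false_eq_true, if_false, beq_iff_eq]
        simp only [List.tail_cons, splitOn_filter_all '_' (by decide),
          splitOn_filter_all '-' (by decide), splitOn_filter_all ' ' (by decide)]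
        by_cases h1 : r = '_'
        · subst h1; simp [Bool.and_assoc]; exact (body_scan_form '_' body).symm ▸ rfl
        · by_cases h2 : r = '-'
          · subst h2; simp [Bool.and_assoc]; exact (body_scan_form '-' body).symm ▸ rfl
          · by_cases h3 : r = ' '
            · subst h3; simp [Bool.and_assoc]; exact (body_scan_form ' ' body).symm ▸ rfl
            · simp [h1, h2, h3]
      · simp [hsw]
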